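-- pv_equiv track=rewrite | github.com/alesapin/torchexperiments | evaluate.py | _transform_classification
-- ===== SOURCE A (Python) =====
-- def _transform_classification(parse):
--     parts = []
--     current_part = [parse[0]]
--     for num, letter in enumerate(parse[1:]):
--         index = num + 1
--         if letter == 'SUFF' and parse[index - 1] == 'B-SUFF':
--             current_part.append(letter)
--         elif letter == 'PREF' and parse[index - 1] == 'B-PREF':
--             current_part.append(letter)
--         elif letter == 'ROOT' and parse[index - 1] == 'B-ROOT':
--             current_part.append(letter)
--         elif letter != parse[index - 1] or letter.startswith('B-'):
--             parts.append(current_part)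
--             current_part = [letter]
--         else:
--             current_part.append(letter)
--     if current_part:
--         parts.append(current_part)
--
--     for part in parts:
--         if part[0] == 'B-PREF':
--             part[0] = 'PREF'
--         if part[0] == 'B-SUFF':
--             part[0] = 'SUFF'
--         if part[0] == 'B-ROOT':
--             part[0] = 'ROOT'
--         if len(part) == 1:
--             part[0] = 'S-' + part[0]
--         else:
--             part[0] = 'B-' + part[0]
--             part[-1] = 'E-' + part[-1]
--             for num, letter in enumerate(part[1:-1]):
--                 part[num+1] = 'M-' + letter
--     result = []
--     for part in parts:
--         result += part
--     return result
-- ===== SOURCE B (Python) =====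
-- def _transform_classification(parse):
--     def boundary(prev, cur):
--         if cur in ('SUFF', 'PREF', 'ROOT') and prev == 'B-' + cur:
--             return False
--         return cur != prev or cur.startswith('B-')
--
--     def strip(tok):
--         if tok in ('B-PREF', 'B-SUFF', 'B-ROOT'):
--             return tok[2:]
--         return tok
--
--     out = []
--     start = True
--     for i, tok in enumerate(parse):
--         end = i + 1 == len(parse) or boundary(tok, parse[i + 1])
--         if start:
--             out.append(('S-' if end else 'B-') + strip(tok))
--         else:
--             out.append(('E-' if end else 'M-') + tok)
--         start = end
--     return out
-- ===== Notes on version B (the rewrite author's own statement) =====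
-- stated objective: simpler
-- what changed: A builds a list of parts, then relabels each part in a second pass and flattens; B emits each output label directly in one pass over the tokens, using a start flag and a one-token lookahead at the boundary predicate, with no intermediate parts structure.
import Mathlib
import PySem

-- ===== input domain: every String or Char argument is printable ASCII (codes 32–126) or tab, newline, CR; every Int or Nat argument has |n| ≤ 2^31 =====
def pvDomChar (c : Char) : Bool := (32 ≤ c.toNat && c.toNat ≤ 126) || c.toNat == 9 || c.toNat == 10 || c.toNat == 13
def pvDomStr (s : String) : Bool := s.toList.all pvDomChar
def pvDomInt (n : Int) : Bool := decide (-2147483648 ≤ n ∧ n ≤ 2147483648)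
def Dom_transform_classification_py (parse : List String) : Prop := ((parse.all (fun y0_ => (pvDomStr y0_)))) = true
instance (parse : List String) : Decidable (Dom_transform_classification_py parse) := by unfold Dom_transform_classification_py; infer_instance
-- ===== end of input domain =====

-- B replaces A's build-parts-then-relabel-then-flatten pipeline by a single pass that
-- emits each label directly from a start flag and a one-token lookahead (objective: simpler).

-- ===== PORT A =====
-- part[1:-1] marking + part[-1] marking of A's second loop: all but the last of the
-- tail get 'M-', the last gets 'E-' (Python sets part[-1] first, then the middles;
-- same resulting list).
def pvMarkA : List String → List String
  | [] => []
  | [x] => ["E-" ++ x]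
  | x :: y :: t => ("M-" ++ x) :: pvMarkA (y :: t)

-- the body of A's `for part in parts` relabel loop ([] is unreachable: A's parts are nonempty)
def pvRelabelA (part : List String) : List String :=
  match part with
  | [] => []
  | h :: t =>
    let h := if h = "B-PREF" then "PREF" else h
    let h := if h = "B-SUFF" then "SUFF" else h
    let h := if h = "B-ROOT" then "ROOT" else h
    if t = [] then ["S-" ++ h] else ("B-" ++ h) :: pvMarkA t

-- one iteration of A's first loop; pl = (parse[index-1], letter) — the enumerate index
-- is used by A only for the parse[index-1] lookup, which is the preceding element,
-- so the loop runs over consecutive pairs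
def pvStepA (st : List (List String) × List String) (pl : String × String) :
    List (List String) × List String :=
  let prev := pl.1
  let letter := pl.2
  if letter = "SUFF" ∧ prev = "B-SUFF" then (st.1, st.2 ++ [letter])
  else if letter = "PREF" ∧ prev = "B-PREF" then (st.1, st.2 ++ [letter])
  else if letter = "ROOT" ∧ prev = "B-ROOT" then (st.1, st.2 ++ [letter])
  else if letter ≠ prev ∨ PySem.Str.startswith letter "B-" then (st.1 ++ [st.2], [letter])
  else (st.1, st.2 ++ [letter])

def transform_classification_py (parse : List String) : List String :=
  match parse with
  | [] => []   -- parse[0] raises IndexError in Python; excluded by Pre_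
  | p0 :: rest =>
    -- for num, letter in enumerate(parse[1:]): pairs (parse[index-1], letter)
    let st := ((p0 :: rest).zip rest).foldl pvStepA ([], [p0])
    let parts := if st.2 ≠ [] then st.1 ++ [st.2] else st.1
    ((parts.map pvRelabelA).flatten)

-- ===== PORT B =====
def pvBoundary (prev cur : String) : Bool :=
  if (cur = "SUFF" ∨ cur = "PREF" ∨ cur = "ROOT") ∧ prev = "B-" ++ cur then false
  else decide (cur ≠ prev) || PySem.Str.startswith cur "B-"

def pvStrip (tok : String) : String :=
  if tok = "B-PREF" ∨ tok = "B-SUFF" ∨ tok = "B-ROOT" then PySem.Str.slice tok (some 2) none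
  else tok

-- Source B's loop carrying `start`; `end` is the i+1==len / boundary(tok, parse[i+1]) lookahead,
-- available here as the head of `rest`
def pvGoB (start : Bool) : List String → List String
  | [] => []
  | tok :: rest =>
    let e : Bool := match rest with
      | [] => true
      | nxt :: _ => pvBoundary tok nxt
    (if start then (if e then "S-" else "B-") ++ pvStrip tok
     else (if e then "E-" else "M-") ++ tok) :: pvGoB e rest

def transform_classification_py_alt (parse : List String) : List String :=
  pvGoB true parse

-- ===== PRECONDITION & SPEC =====
-- Pre_ excludes only the empty list, on which A raises IndexError (parse[0]).
def Pre_transform_classification_py (parse : List String) : Prop := parse ≠ []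
instance (parse : List String) : Decidable (Pre_transform_classification_py parse) := by
  unfold Pre_transform_classification_py; infer_instance

def pvWitness_transform_classification_py : List String :=
  ["B-ROOT", "ROOT", "B-SUFF", "SUFF", "LINK"]

def Spec_transform_classification_py (parse : List String) (out : List String) : Prop :=
  out = transform_classification_py_alt parse
instance (parse : List String) (out : List String) : Decidable (Spec_transform_classification_py parse out) := by
  unfold Spec_transform_classification_py; infer_instance

-- ===== CLAIM (what is proved, stated in full; the proofs are below) =====
def Claim_equal_transform_classification_py : Prop :=
  ∀ (parse : List String), Dom_transform_classification_py parse →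
    Pre_transform_classification_py parse →
    Spec_transform_classification_py parse (transform_classification_py parse)

-- ===== LEMMAS AND PROOFS =====

-- the tokens A appends to the current part before the next part starts, and the remainder
def pvSplit1 (prev : String) : List String → List String × List String
  | [] => ([], [])
  | x :: xs =>
    if pvBoundary prev x then ([], x :: xs)
    else (x :: (pvSplit1 x xs).1, (pvSplit1 x xs).2)

lemma pvSplit1_snd_len (xs : List String) : ∀ prev, (pvSplit1 prev xs).2.length ≤ xs.length := by
  induction xs with
  | nil => intro prev; simp [pvSplit1]
  | cons x xs ih =>
    intro prev
    simp only [pvSplit1]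
    split
    · simp
    · exact le_trans (ih x) (Nat.le_succ _)

-- A's segmentation of prev::xs into maximal parts
def pvSegs (x : String) (xs : List String) : List (List String) :=
  (x :: (pvSplit1 x xs).1) ::
    (match _h : (pvSplit1 x xs).2 with
     | [] => []
     | y :: ys => pvSegs y ys)
termination_by xs.length
decreasing_by
  have := pvSplit1_snd_len xs x
  rw [_h] at this
  simp at this
  omega

def pvSegsOpt : List String → List (List String)
  | [] => []
  | y :: ys => pvSegs y ys

lemma pvSegs_eq (x : String) (xs : List String) :
    pvSegs x xs = (x :: (pvSplit1 x xs).1) :: pvSegsOpt (pvSplit1 x xs).2 := by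
  rw [pvSegs]
  cases h : (pvSplit1 x xs).2 <;> simp [pvSegsOpt]

lemma pvSplit1_cons (prev x : String) (xs : List String) :
    pvSplit1 prev (x :: xs) =
      if pvBoundary prev x then ([], x :: xs)
      else (x :: (pvSplit1 x xs).1, (pvSplit1 x xs).2) := rfl

lemma pvGoB_single (s : Bool) (a : String) :
    pvGoB s [a] = [if s then "S-" ++ pvStrip a else "E-" ++ a] := rfl

lemma pvGoB_cons₂ (s : Bool) (a b : String) (t : List String) :
    pvGoB s (a :: b :: t) =
      (if s then (if pvBoundary a b then "S-" else "B-") ++ pvStrip a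
       else (if pvBoundary a b then "E-" else "M-") ++ a) :: pvGoB (pvBoundary a b) (b :: t) := rfl

lemma pvStepA_eq (st : List (List String) × List String) (prev letter : String) :
    pvStepA st (prev, letter) =
      if pvBoundary prev letter then (st.1 ++ [st.2], [letter]) else (st.1, st.2 ++ [letter]) := by
  by_cases c1 : letter = "SUFF" ∧ prev = "B-SUFF"
  · obtain ⟨h1, h2⟩ := c1; subst h1; subst h2
    have hb : pvBoundary "B-SUFF" "SUFF" = false := by decide
    rw [hb]
    simp [pvStepA]
  · by_cases c2 : letter = "PREF" ∧ prev = "B-PREF"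
    · obtain ⟨h1, h2⟩ := c2; subst h1; subst h2
      have hb : pvBoundary "B-PREF" "PREF" = false := by decide
      rw [hb]
      simp [pvStepA]
    · by_cases c3 : letter = "ROOT" ∧ prev = "B-ROOT"
      · obtain ⟨h1, h2⟩ := c3; subst h1; subst h2
        have hb : pvBoundary "B-ROOT" "ROOT" = false := by decide
        rw [hb]
        simp [pvStepA]
      · have hcond : ¬ ((letter = "SUFF" ∨ letter = "PREF" ∨ letter = "ROOT") ∧ prev = "B-" ++ letter) := by
          rintro ⟨h1 | h1 | h1, h2⟩ <;> subst h1
          · exact c1 ⟨rfl, h2.trans (by decide)⟩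
          · exact c2 ⟨rfl, h2.trans (by decide)⟩
          · exact c3 ⟨rfl, h2.trans (by decide)⟩
        have hb : pvBoundary prev letter =
            (decide (letter ≠ prev) || PySem.Str.startswith letter "B-") := by
          simp only [pvBoundary, if_neg hcond]
        rw [hb]
        simp only [pvStepA, if_neg c1, if_neg c2, if_neg c3]
        by_cases c4 : letter ≠ prev ∨ PySem.Str.startswith letter "B-" = true
        · rw [if_pos (by simpa using c4), if_pos (by simpa using c4)]
        · rw [if_neg (by simpa using c4), if_neg (by simpa using c4)]

lemma pvFold_snd_ne (l : List (String × String)) :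
    ∀ parts cur, cur ≠ [] → (l.foldl pvStepA (parts, cur)).2 ≠ [] := by
  induction l with
  | nil => intro parts cur h; simpa using h
  | cons p l ih =>
    intro parts cur h
    obtain ⟨prev, letter⟩ := p
    simp only [List.foldl_cons, pvStepA_eq]
    split
    · exact ih _ _ (by simp)
    · exact ih _ _ (by simp)

lemma pvLemA (xs : List String) :
    ∀ prev cur parts,
      (((prev :: xs).zip xs).foldl pvStepA (parts, cur)).1 ++
        [(((prev :: xs).zip xs).foldl pvStepA (parts, cur)).2] =
      parts ++ ((cur ++ (pvSplit1 prev xs).1) :: pvSegsOpt (pvSplit1 prev xs).2) := by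
  induction xs with
  | nil => intro prev cur parts; simp [pvSplit1, pvSegsOpt]
  | cons x xs ih =>
    intro prev cur parts
    simp only [List.zip_cons_cons, List.foldl_cons, pvStepA_eq, pvSplit1_cons]
    by_cases hb : pvBoundary prev x = true
    · simp only [hb, if_true, ih x [x] (parts ++ [cur]),
        show pvSegsOpt (x :: xs) = pvSegs x xs from rfl, pvSegs_eq]
      simp
    · simp only [hb, Bool.false_eq_true, if_false, ih x (cur ++ [x]) parts]
      simp

lemma pvRelabel_single (x : String) : pvRelabelA [x] = ["S-" ++ pvStrip x] := by
  by_cases h1 : x = "B-PREF"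
  · subst h1; decide
  by_cases h2 : x = "B-SUFF"
  · subst h2; decide
  by_cases h3 : x = "B-ROOT"
  · subst h3; decide
  have e : pvStrip x = x := by rw [pvStrip, if_neg (by tauto)]
  rw [e]
  simp [pvRelabelA, h1, h2, h3]

lemma pvRelabel_cons (x : String) (t : List String) (h : t ≠ []) :
    pvRelabelA (x :: t) = ("B-" ++ pvStrip x) :: pvMarkA t := by
  by_cases h1 : x = "B-PREF"
  · subst h1
    have e : pvStrip "B-PREF" = "PREF" := by decide
    rw [e]; simp [pvRelabelA, h]
  by_cases h2 : x = "B-SUFF"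
  · subst h2
    have e : pvStrip "B-SUFF" = "SUFF" := by decide
    rw [e]; simp [pvRelabelA, h]
  by_cases h3 : x = "B-ROOT"
  · subst h3
    have e : pvStrip "B-ROOT" = "ROOT" := by decide
    rw [e]; simp [pvRelabelA, h]
  have e : pvStrip x = x := by rw [pvStrip, if_neg (by tauto)]
  rw [e]
  simp [pvRelabelA, h1, h2, h3, h]

lemma pvLemB1 (xs : List String) :
    ∀ prev, pvGoB false (prev :: xs) =
      pvMarkA (prev :: (pvSplit1 prev xs).1) ++ pvGoB true (pvSplit1 prev xs).2 := by
  induction xs with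
  | nil => intro prev; rw [pvGoB_single]; simp [pvSplit1, pvMarkA, pvGoB]
  | cons x xs ih =>
    intro prev
    rw [pvGoB_cons₂, pvSplit1_cons]
    by_cases hb : pvBoundary prev x = true
    · simp only [hb, if_true]
      simp [pvMarkA]
    · simp only [hb, Bool.false_eq_true, if_false]
      rw [ih x]
      simp [pvMarkA]

lemma pvLemB2 (n : Nat) :
    ∀ (r : List String), r.length ≤ n →
      pvGoB true r = ((pvSegsOpt r).map pvRelabelA).flatten := by
  induction n with
  | zero =>
    intro r hr
    have : r = [] := List.length_eq_zero_iff.mp (Nat.le_zero.mp hr)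
    subst this
    simp [pvGoB, pvSegsOpt]
  | succ n ih =>
    intro r hr
    match r with
    | [] => simp [pvGoB, pvSegsOpt]
    | x :: xs =>
      have hxs : xs.length ≤ n := by simpa using hr
      rw [show pvSegsOpt (x :: xs) = pvSegs x xs from rfl, pvSegs_eq]
      match xs with
      | [] =>
        rw [pvGoB_single]
        simp [pvSplit1, pvSegsOpt, pvRelabel_single]
      | y :: ys =>
        have hr' : (pvSplit1 y ys).2.length ≤ n := by
          have := pvSplit1_snd_len ys y
          simp at hxs
          omega
        rw [pvGoB_cons₂, pvSplit1_cons]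
        by_cases hb : pvBoundary x y = true
        · have hr2 : (y :: ys).length ≤ n := hxs
          simp only [hb, if_true]
          rw [ih (y :: ys) hr2]
          simp [pvSegsOpt, pvRelabel_single]
        · simp only [hb, Bool.false_eq_true, if_false]
          rw [pvLemB1 ys y]
          rw [ih (pvSplit1 y ys).2 hr']
          simp only [List.map_cons, List.flatten_cons,
            pvRelabel_cons x (y :: (pvSplit1 y ys).1) (by simp)]
          simp

-- ===== VERDICT (by name: the statement is the Claim_ definition above) =====
theorem transform_classification_py_spec : Claim_equal_transform_classification_py := by
  intro parse _ hpre
  unfold Spec_transform_classification_py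
  match parse with
  | [] => exact absurd rfl hpre
  | p0 :: rest =>
    have hne := pvFold_snd_ne (((p0 :: rest)).zip rest) [] [p0] (by simp)
    simp only [transform_classification_py, if_pos hne]
    rw [pvLemA rest p0 [p0] []]
    have hB := pvLemB2 (p0 :: rest).length (p0 :: rest) (le_refl _)
    rw [show transform_classification_py_alt (p0 :: rest) = pvGoB true (p0 :: rest) from rfl,
        hB, show pvSegsOpt (p0 :: rest) = pvSegs p0 rest from rfl, pvSegs_eq]
    simp
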